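-- pv_equiv track=rewrite | github.com/the-cyber-boardroom/SGraph-AI__Service__Playwright | sgraph_ai_service_playwright/service/Capability__Detector.py | extract_version_digits
-- ===== SOURCE A (Python) =====
-- from typing                                                                                         import List
--
-- FALLBACK_VERSION     = '0.0.0'                                                      # Safe_Str__Version rejects 'unknown'; use a sentinel instead
--
-- def extract_version_digits(text: str) -> str:                             # Pulls 'chrome-1234' -> '1234' style tokens for Safe_Str__Version
--     digits : List[str] = []
--     current : str       = ''
--     for ch in text:
--         if ch.isdigit() or ch == '.':
--             current += ch
--         else:
--             if current:
--                 digits.append(current)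
--             current = ''
--     if current:
--         digits.append(current)
--     return digits[-1] if digits else FALLBACK_VERSION
-- ===== SOURCE B (Python) =====
-- FALLBACK_VERSION = '0.0.0'
--
-- def extract_version_digits(text: str) -> str:
--     # Scan backwards: skip trailing non-version chars, then collect the last
--     # maximal run of digits/dots; no list of runs is ever built.
--     rev = text[::-1]
--     i = 0
--     while i < len(rev) and not (rev[i].isdigit() or rev[i] == '.'):
--         i += 1
--     j = i
--     while j < len(rev) and (rev[j].isdigit() or rev[j] == '.'):
--         j += 1
--     return rev[i:j][::-1] if j > i else FALLBACK_VERSION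
-- ===== Notes on version B (the rewrite author's own statement) =====
-- stated objective: alternative
-- what changed: B scans the string backwards from the end and extracts only the last digit/dot run directly, instead of A's forward pass that accumulates every run into a list and then takes the last element.
import Mathlib
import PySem

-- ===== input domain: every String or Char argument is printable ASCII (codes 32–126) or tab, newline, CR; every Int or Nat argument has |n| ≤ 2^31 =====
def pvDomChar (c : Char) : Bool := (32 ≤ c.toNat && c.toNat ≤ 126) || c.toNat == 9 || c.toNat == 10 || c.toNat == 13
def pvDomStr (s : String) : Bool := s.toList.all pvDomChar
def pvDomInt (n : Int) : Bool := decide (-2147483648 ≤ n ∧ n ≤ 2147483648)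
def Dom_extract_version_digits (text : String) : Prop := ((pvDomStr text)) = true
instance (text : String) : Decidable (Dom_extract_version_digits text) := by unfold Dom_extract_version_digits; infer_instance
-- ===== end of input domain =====

-- B scans backwards and extracts only the last digit/dot run; A accumulates all runs
-- forwards and takes the last one.  Equivalence of the return values is proved (no Pre_: A is total).

-- shared character class: Python's `ch.isdigit() or ch == '.'` (exact on the ASCII domain)
def pvIsVer (c : Char) : Bool := c.isDigit || c == '.'

-- ===== PORT A =====
-- one step of A's for-loop over (digits, current)
def pvStepA (st : List String × List Char) (ch : Char) : List String × List Char :=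
  if pvIsVer ch then (st.1, st.2 ++ [ch])
  else ((if st.2.isEmpty then st.1 else st.1 ++ [String.ofList st.2]), [])

def extract_version_digits (text : String) : String :=
  let st := text.toList.foldl pvStepA ([], [])
  let digits := if st.2.isEmpty then st.1 else st.1 ++ [String.ofList st.2]
  match digits.getLast? with          -- digits[-1] if digits else FALLBACK_VERSION
  | some v => v
  | none => "0.0.0"

-- ===== PORT B =====
def extract_version_digits_alt (text : String) : String :=
  let rev := text.toList.reverse
  let skipped := rev.dropWhile (fun c => !(pvIsVer c))   -- first while loop: skip non-version chars
  let run := skipped.takeWhile pvIsVer                   -- second while loop: collect the run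
  if run.isEmpty then "0.0.0" else String.ofList run.reverse

-- ===== PRECONDITION & SPEC =====
def Spec_extract_version_digits (text : String) (out : String) : Prop := out = extract_version_digits_alt text
instance (text : String) (out : String) : Decidable (Spec_extract_version_digits text out) := by unfold Spec_extract_version_digits; infer_instance

-- ===== CLAIM (what is proved, stated in full; the proofs are below) =====
def Claim_equal_extract_version_digits : Prop := ∀ (text : String), Dom_extract_version_digits text → Spec_extract_version_digits text (extract_version_digits text)

-- ===== LEMMAS AND PROOFS =====

-- proof helper: the list of maximal pvIsVer-runs of a char list, left to right
def pvRuns (l : List Char) : List (List Char) :=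
  match l with
  | [] => []
  | c :: rest =>
    if pvIsVer c then (c :: rest.takeWhile pvIsVer) :: pvRuns (rest.dropWhile pvIsVer)
    else pvRuns rest
termination_by l.length
decreasing_by
  · exact Nat.lt_succ_of_le (List.length_dropWhile_le _ _)
  · exact Nat.lt_succ_of_le (Nat.le_refl _)

-- A's loop computes exactly the runs (with a pending `cur` merging into the first run)
lemma pvFoldA_runs (l : List Char) (d : List String) (cur : List Char) :
    (let st := l.foldl pvStepA (d, cur)
     if st.2.isEmpty then st.1 else st.1 ++ [String.ofList st.2]) =
    d ++ (if cur.isEmpty then (pvRuns l).map (fun r => String.ofList r)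
          else String.ofList (cur ++ l.takeWhile pvIsVer) ::
               (pvRuns (l.dropWhile pvIsVer)).map (fun r => String.ofList r)) := by
  induction l generalizing d cur with
  | nil =>
    cases cur with
    | nil => simp [pvRuns]
    | cons a t => simp [pvRuns]
  | cons c rest ih =>
    by_cases h : pvIsVer c = true
    · have := ih d (cur ++ [c])
      simp [List.foldl_cons, pvStepA, h] at this ⊢
      rw [this]
      cases cur with
      | nil => simp [pvRuns, h]
      | cons a t => simp [h]
    · have hb : pvIsVer c = false := by simpa using h
      cases cur with
      | nil =>
        have := ih d ([] : List Char)
        simp [List.foldl_cons, pvStepA, hb] at this ⊢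
        rw [this]; simp [pvRuns, hb]
      | cons a t =>
        have := ih (d ++ [String.ofList (a :: t)]) ([] : List Char)
        simp [List.foldl_cons, pvStepA, hb] at this ⊢
        rw [this]; simp [pvRuns, hb]

-- appending an all-ver nonempty block after a list not ending in a ver char adds one run
lemma pvRuns_append_run (m r : List Char) (hr : r ≠ [])
    (hall : ∀ c ∈ r, pvIsVer c = true)
    (hlast : ∀ x, m.getLast? = some x → pvIsVer x = false) :
    pvRuns (m ++ r) = pvRuns m ++ [r] := by
  induction m using pvRuns.induct with
  | case1 =>
    cases r with
    | nil => exact absurd rfl hr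
    | cons c t =>
      have hc : pvIsVer c = true := hall c (by simp)
      have ht : ∀ x ∈ t, pvIsVer x = true := fun x hx => hall x (by simp [hx])
      simp [pvRuns, hc, List.takeWhile_eq_self_iff.2 ht, List.dropWhile_eq_nil_iff.2 ht]
  | case2 c rest hc ih =>
    -- m = c :: rest with pvIsVer c = true; m's last is not ver, so rest has a non-ver char
    have hrest : ¬ (∀ x ∈ rest, pvIsVer x = true) := by
      intro hallrest
      have hne : (c :: rest) ≠ ([] : List Char) := by simp
      have := hlast _ (List.getLast?_eq_some_getLast hne)
      have hmem : (c :: rest).getLast hne ∈ c :: rest := List.getLast_mem _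
      cases List.mem_cons.1 hmem with
      | inl he => rw [he] at this; simp [hc] at this
      | inr hm => have := hallrest _ hm; simp_all
    have htw : (rest.takeWhile pvIsVer).length ≠ rest.length := by
      intro hlen
      exact hrest (List.takeWhile_eq_self_iff.1
        (List.Sublist.eq_of_length (List.takeWhile_sublist _) hlen))
    have hdw : (rest.dropWhile pvIsVer) ≠ [] := by
      intro hnil; exact hrest (List.dropWhile_eq_nil_iff.1 hnil)
    have hdlast : ∀ x, (rest.dropWhile pvIsVer).getLast? = some x → pvIsVer x = false := by
      intro x hx
      have h1 : rest.getLast? = some x := by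
        conv_lhs => rw [← List.takeWhile_append_dropWhile (p := pvIsVer) (l := rest)]
        rw [List.getLast?_append, hx]; rfl
      apply hlast x
      rw [List.getLast?_cons, h1]; rfl
    have key := ih hdlast
    have e1 : List.takeWhile pvIsVer (rest ++ r) = List.takeWhile pvIsVer rest := by
      rw [List.takeWhile_append]; simp [htw]
    have e2 : List.dropWhile pvIsVer (rest ++ r) = List.dropWhile pvIsVer rest ++ r := by
      rw [List.dropWhile_append]; simp [List.isEmpty_iff, hdw]
    simp [pvRuns, hc, e1, e2, key]
  | case3 c rest hc ih =>
    have hrlast : ∀ x, rest.getLast? = some x → pvIsVer x = false := by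
      intro x hx
      apply hlast x
      rw [List.getLast?_cons, hx]; rfl
    simp [pvRuns, hc, ih hrlast]

-- appending a non-ver char does not change the runs
lemma pvRuns_append_bad (m : List Char) (c : Char) (hc : pvIsVer c = false) :
    pvRuns (m ++ [c]) = pvRuns m := by
  induction m using pvRuns.induct with
  | case1 => simp [pvRuns, hc]
  | case2 a rest ha ih =>
    by_cases hall : ∀ x ∈ rest, pvIsVer x = true
    · have htw : rest.takeWhile pvIsVer = rest := List.takeWhile_eq_self_iff.2 hall
      have hdw : rest.dropWhile pvIsVer = [] := List.dropWhile_eq_nil_iff.2 hall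
      simp [pvRuns, ha, List.takeWhile_append, List.dropWhile_append, htw, hdw, hc]
    · have htw : (rest.takeWhile pvIsVer).length ≠ rest.length := by
        intro hlen
        exact hall (List.takeWhile_eq_self_iff.1
          (List.Sublist.eq_of_length (List.takeWhile_sublist _) hlen))
      have hdw : (rest.dropWhile pvIsVer) ≠ [] := by
        intro hnil; exact hall (List.dropWhile_eq_nil_iff.1 hnil)
      simp [pvRuns, ha, List.takeWhile_append, List.dropWhile_append, htw, hdw,
        List.isEmpty_iff, ih]
  | case3 a rest ha ih =>
    simp [pvRuns, ha, ih]

-- the runs of the reversed list are the reversed runs, each reversed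
lemma pvRuns_reverse (l : List Char) :
    pvRuns l.reverse = ((pvRuns l).map List.reverse).reverse := by
  induction l using pvRuns.induct with
  | case1 => simp [pvRuns]
  | case2 c rest hc ih =>
    have hsplit : rest = rest.takeWhile pvIsVer ++ rest.dropWhile pvIsVer :=
      (List.takeWhile_append_dropWhile).symm
    have hrev : (c :: rest).reverse =
        (rest.dropWhile pvIsVer).reverse ++ ((rest.takeWhile pvIsVer).reverse ++ [c]) := by
      rw [List.reverse_cons]
      conv_lhs => rw [hsplit]
      rw [List.reverse_append, List.append_assoc]
    have hall : ∀ x ∈ (rest.takeWhile pvIsVer).reverse ++ [c], pvIsVer x = true := by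
      intro x hx
      rcases List.mem_append.1 hx with h | h
      · exact List.mem_takeWhile_imp (List.mem_reverse.1 h)
      · simp at h; rw [h]; exact hc
    have hlast : ∀ x, ((rest.dropWhile pvIsVer).reverse).getLast? = some x → pvIsVer x = false := by
      intro x hx
      rw [List.getLast?_reverse] at hx
      have := List.head?_dropWhile_not pvIsVer rest
      rw [hx] at this
      exact this
    rw [hrev, pvRuns_append_run _ _ (by simp) hall hlast, ih]
    simp [pvRuns, hc]
  | case3 c rest hc ih =>
    have : (c :: rest).reverse = rest.reverse ++ [c] := by simp
    rw [this, pvRuns_append_bad _ _ (by simpa using hc), ih]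
    simp [pvRuns, hc]

-- B's drop/take pair computes the head run
lemma pvHeadRun (m : List Char) :
    (m.dropWhile (fun c => !(pvIsVer c))).takeWhile pvIsVer = ((pvRuns m).head?).getD [] := by
  induction m with
  | nil => simp [pvRuns]
  | cons c rest ih =>
    by_cases h : pvIsVer c = true
    · simp [pvRuns, h, List.dropWhile_cons, List.takeWhile_cons]
    · have hb : pvIsVer c = false := by simpa using h
      simp [pvRuns, hb, List.dropWhile_cons, ih]

-- ===== VERDICT (by name: the statement is the Claim_ definition above) =====
theorem extract_version_digits_spec : Claim_equal_extract_version_digits := by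
  intro text _
  unfold Spec_extract_version_digits extract_version_digits extract_version_digits_alt
  have hA := pvFoldA_runs text.toList [] []
  simp only [List.isEmpty_nil, if_true] at hA
  simp only [hA, List.nil_append]
  rw [pvHeadRun, pvRuns_reverse]
  rw [List.getLast?_map]
  cases hL : (pvRuns text.toList).getLast? with
  | none =>
    have : pvRuns text.toList = [] := by
      cases hp : pvRuns text.toList with
      | nil => rfl
      | cons a t => rw [hp] at hL; simp [List.getLast?_eq_getLast] at hL
    simp [this]
  | some r =>
    have hne : pvRuns text.toList ≠ [] := by
      intro h; rw [h] at hL; simp at hL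
    have hrne : r ≠ [] := by
      -- every run produced by pvRuns is nonempty
      have : ∀ m rr, rr ∈ pvRuns m → rr ≠ [] := by
        intro m
        induction m using pvRuns.induct with
        | case1 => intro rr h; simp [pvRuns] at h
        | case2 c rest hc ih =>
          intro rr h
          simp [pvRuns, hc] at h
          rcases h with h | h
          · rw [h]; simp
          · exact ih rr h
        | case3 c rest hc ih =>
          intro rr h
          simp [pvRuns, hc] at h
          exact ih rr h
      exact this _ r (List.mem_of_getLast? hL)
    have hhead : (((pvRuns text.toList).map List.reverse).reverse).head? = some r.reverse := by
      rw [List.head?_reverse, List.getLast?_map, hL]; rfl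
    rw [hhead]
    simp [List.isEmpty_iff, hrne, hL]
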